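-- pv_equiv track=rewrite | github.com/Lucascbayma/wod_tracker | wod_tracker.py | validar_movimentos
-- ===== SOURCE A (Python) =====
-- def validar_movimentos(movimentos):
--     if not movimentos or ',' not in movimentos:
--         return False
--     # Verificar se contém apenas letras, espaços e vírgulas
--     for char in movimentos:
--         if not (char.isalpha() or char == ' ' or char == ','):
--             return False
--     # Verificar se cada movimento não está vazio
--     mov_list = [mov.strip() for mov in movimentos.split(',')]
--     return all(mov for mov in mov_list)
-- ===== SOURCE B (Python) =====
-- def validar_movimentos(movimentos):
--     if not movimentos or ',' not in movimentos:
--         return False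
--     # single pass: at each comma (and at the end) the current segment must
--     # have contained at least one letter; any other character is invalid
--     has_letter = False
--     for ch in movimentos:
--         if ch == ',':
--             if not has_letter:
--                 return False
--             has_letter = False
--         elif ch == ' ':
--             pass
--         elif ch.isalpha():
--             has_letter = True
--         else:
--             return False
--     return has_letter
-- ===== Notes on version B (the rewrite author's own statement) =====
-- stated objective: simpler
-- what changed: Replaced A's three passes (character-class scan, split on commas, strip-and-check each part) by a single left-to-right pass that tracks whether the current comma-separated segment has seen a letter.
import Mathlib
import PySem

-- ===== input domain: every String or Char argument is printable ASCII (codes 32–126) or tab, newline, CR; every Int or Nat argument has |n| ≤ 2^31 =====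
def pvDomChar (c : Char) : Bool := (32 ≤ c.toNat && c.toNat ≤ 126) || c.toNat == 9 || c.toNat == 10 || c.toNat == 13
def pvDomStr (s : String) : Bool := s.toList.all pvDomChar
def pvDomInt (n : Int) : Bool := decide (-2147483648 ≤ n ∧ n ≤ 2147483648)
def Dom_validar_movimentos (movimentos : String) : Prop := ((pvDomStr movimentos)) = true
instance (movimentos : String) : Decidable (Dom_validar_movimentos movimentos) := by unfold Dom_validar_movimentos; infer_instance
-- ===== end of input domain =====

-- B replaces A's three passes (character-class scan, split on ',', strip-and-check each part)
-- by one left-to-right pass tracking whether the current segment has seen a letter (simpler).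

-- ===== PORT A =====
def validar_movimentos (movimentos : String) : Bool :=
  let cs := movimentos.toList
  if cs.isEmpty || !(PySem.Chars.isIn [','] cs) then false
  else if !(cs.all (fun ch => PySem.Chars.isalpha ch || ch == ' ' || ch == ',')) then false
  else
    let mov_list := (PySem.Chars.splitOn cs [',']).map PySem.Chars.strip
    mov_list.all (fun mov => !mov.isEmpty)

-- ===== PORT B =====
-- the for-loop of Source B; state = has_letter
def valLoop : List Char → Bool → Bool
  | [], hasLetter => hasLetter
  | ch :: rest, hasLetter =>
    if ch == ',' then (if !hasLetter then false else valLoop rest false)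
    else if ch == ' ' then valLoop rest hasLetter
    else if PySem.Chars.isalpha ch then valLoop rest true
    else false

def validar_movimentos_alt (movimentos : String) : Bool :=
  let cs := movimentos.toList
  if cs.isEmpty || !(PySem.Chars.isIn [','] cs) then false
  else valLoop cs false

-- ===== PRECONDITION & SPEC =====
def Spec_validar_movimentos (movimentos : String) (out : Bool) : Prop := out = validar_movimentos_alt movimentos
instance (movimentos : String) (out : Bool) : Decidable (Spec_validar_movimentos movimentos out) := by unfold Spec_validar_movimentos; infer_instance

-- ===== CLAIM (what is proved, stated in full; the proofs are below) =====
def Claim_equal_validar_movimentos : Prop := ∀ (movimentos : String), Dom_validar_movimentos movimentos → Spec_validar_movimentos movimentos (validar_movimentos movimentos)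

-- ===== LEMMAS AND PROOFS =====

def splitC : List Char → List (List Char)
  | [] => [[]]
  | c :: rest =>
    if c = ',' then [] :: splitC rest
    else (c :: (splitC rest).headI) :: (splitC rest).tail
theorem splitC_ne_nil (cs : List Char) : splitC cs ≠ [] := by
  cases cs with
  | nil => simp [splitC]
  | cons c rest => simp only [splitC]; split <;> simp
theorem splitC_head_tail (cs : List Char) :
    splitC cs = (splitC cs).headI :: (splitC cs).tail := by
  cases h : splitC cs with
  | nil => exact absurd h (splitC_ne_nil cs)
  | cons p ps => simp
theorem go_eq (fuel : Nat) : ∀ (l cur : List Char) (accs : List (List Char)),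
    l.length < fuel →
    PySem.Chars.splitOn.go [','] fuel l cur accs =
      accs.reverse ++ (cur.reverse ++ (splitC l).headI) :: (splitC l).tail := by
  induction fuel with
  | zero => intro l cur accs h; omega
  | succ n ih =>
    intro l cur accs h
    cases l with
    | nil => simp [PySem.Chars.splitOn.go, splitC]
    | cons c rest =>
      by_cases hc : c = ','
      · subst hc
        rw [PySem.Chars.splitOn.go]
        rw [if_pos (by simp [List.isPrefixOf])]
        rw [ih _ _ _ (by simpa using h)]
        have hs : splitC (',' :: rest) = [] :: splitC rest := by simp [splitC]
        rw [hs]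
        conv_rhs => rw [splitC_head_tail rest]
        simp [List.drop]
      · rw [PySem.Chars.splitOn.go]
        rw [if_neg (by simp [List.isPrefixOf]; exact fun e => hc e.symm)]
        rw [ih _ _ _ (by simpa using h)]
        have hs : splitC (c :: rest) = (c :: (splitC rest).headI) :: (splitC rest).tail := by simp [splitC, hc]
        rw [hs]
        simp

theorem splitOn_eq_splitC (cs : List Char) :
    PySem.Chars.splitOn cs [','] = splitC cs := by
  rw [PySem.Chars.splitOn, go_eq _ _ _ _ (by omega)]
  simp
  rw [← splitC_head_tail]

theorem valLoop_eq (cs : List Char) (h : Bool) :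
    valLoop cs h =
      (cs.all (fun ch => PySem.Chars.isalpha ch || ch == ' ' || ch == ',') &&
       (h || (splitC cs).headI.any PySem.Chars.isalpha) &&
       (splitC cs).tail.all (fun m => m.any PySem.Chars.isalpha)) := by
  induction cs generalizing h with
  | nil => simp [valLoop, splitC]
  | cons c rest ih =>
    by_cases hc : c = ','
    · subst hc
      have hs : splitC (',' :: rest) = [] :: splitC rest := by simp [splitC]
      rw [hs]
      simp only [valLoop, beq_self_eq_true, if_true, List.all_cons, List.headI, List.tail]
      cases h with
      | false => simp
      | true =>
        rw [ih false]
        conv_rhs => rw [splitC_head_tail rest]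
        simp [Bool.and_comm, Bool.and_assoc, Bool.and_left_comm]
    · have hs : splitC (c :: rest) = (c :: (splitC rest).headI) :: (splitC rest).tail := by
        simp [splitC, hc]
      rw [hs]
      simp only [valLoop, List.all_cons, List.headI, List.tail]
      by_cases hsp : c = ' '
      · subst hsp
        rw [if_neg (by decide), if_pos (by decide), ih h]
        simp [show PySem.Chars.isalpha ' ' = false from rfl]
        rfl
      · by_cases ha : PySem.Chars.isalpha c = true
        · rw [if_neg (by simp [hc]), if_neg (by simp [hsp]), if_pos (by simp [ha]), ih true]
          simp [ha]
          rfl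
        · rw [if_neg (by simp [hc]), if_neg (by simp [hsp]), if_neg (by simp [ha])]
          simp [Bool.eq_false_iff.mpr ha, hc, hsp]

theorem mem_splitC (cs : List Char) : ∀ m ∈ splitC cs, ∀ c ∈ m, c ∈ cs ∧ c ≠ ',' := by
  induction cs with
  | nil => intro m hm c hc; simp [splitC] at hm; simp [hm] at hc
  | cons x rest ih =>
    intro m hm c hc
    by_cases hx : x = ','
    · subst hx
      simp [splitC] at hm
      rcases hm with h1 | h2
      · simp [h1] at hc
      · have := ih m h2 c hc
        exact ⟨List.mem_cons_of_mem _ this.1, this.2⟩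
    · rw [show splitC (x :: rest) = (x :: (splitC rest).headI) :: (splitC rest).tail from by simp [splitC, hx]] at hm
      rcases List.mem_cons.mp hm with h1 | h2
      · subst h1
        rcases List.mem_cons.mp hc with rfl | hc2
        · exact ⟨List.mem_cons_self, hx⟩
        · have hh : (splitC rest).headI ∈ splitC rest := by
            rw [splitC_head_tail rest]; exact List.mem_cons_self
          have := ih _ hh c hc2
          exact ⟨List.mem_cons_of_mem _ this.1, this.2⟩
      · have hmem : m ∈ splitC rest := by
          rw [splitC_head_tail rest]; exact List.mem_cons_of_mem _ h2
        have := ih m hmem c hc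
        exact ⟨List.mem_cons_of_mem _ this.1, this.2⟩

theorem char_le_toNat {a b : Char} (h : a ≤ b) : a.toNat ≤ b.toNat := by
  simpa using UInt32.le_iff_toNat_le.mp (Char.le_def.mp h)

theorem isalpha_not_isspace (c : Char) (h : PySem.Chars.isalpha c = true) :
    PySem.Chars.isspace c = false := by
  have h' : ('A' ≤ c ∧ c ≤ 'Z') ∨ ('a' ≤ c ∧ c ≤ 'z') := by
    simpa [PySem.Chars.isalpha, PySem.Chars.isupper, PySem.Chars.islower] using h
  have hh : 65 ≤ c.toNat ∧ c.toNat ≤ 90 ∨ 97 ≤ c.toNat ∧ c.toNat ≤ 122 := by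
    rcases h' with ⟨h1, h2⟩ | ⟨h1, h2⟩
    · exact Or.inl ⟨by simpa using char_le_toNat h1, by simpa using char_le_toNat h2⟩
    · exact Or.inr ⟨by simpa using char_le_toNat h1, by simpa using char_le_toNat h2⟩
  simp only [PySem.Chars.isspace, Bool.or_eq_false_iff, Bool.and_eq_false_iff,
    decide_eq_false_iff_not]
  omega

theorem strip_eq_nil_iff (m : List Char) :
    PySem.Chars.strip m = [] ↔ ∀ c ∈ m, PySem.Chars.isspace c := by
  rw [PySem.Chars.strip, PySem.Chars.rstrip, PySem.Chars.lstrip,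
      List.reverse_eq_nil_iff, List.dropWhile_eq_nil_iff]
  constructor
  · intro h c hc
    have hm : c ∈ List.takeWhile PySem.Chars.isspace m ++ List.dropWhile PySem.Chars.isspace m := by
      rw [List.takeWhile_append_dropWhile]; exact hc
    rcases List.mem_append.mp hm with h4 | h4
    · exact List.mem_takeWhile_imp h4
    · exact h c (List.mem_reverse.mpr h4)
  · intro h x hx
    exact h x ((List.dropWhile_sublist _).subset (List.mem_reverse.mp hx))

theorem strip_seg (m : List Char)
    (hgood : ∀ c ∈ m, PySem.Chars.isalpha c || c == ' ') :
    (!(PySem.Chars.strip m).isEmpty) = m.any PySem.Chars.isalpha := by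
  by_cases h : m.any PySem.Chars.isalpha = true
  · rw [h]
    have hne : PySem.Chars.strip m ≠ [] := by
      intro hnil
      rcases List.any_eq_true.mp h with ⟨c, hc, ha⟩
      have := (strip_eq_nil_iff m).mp hnil c hc
      rw [isalpha_not_isspace c ha] at this
      exact absurd this (by simp)
    simp [hne]
  · rw [show m.any PySem.Chars.isalpha = false from by simpa using h]
    have hall : ∀ c ∈ m, c = ' ' := by
      intro c hc
      rcases (by simpa using hgood c hc : PySem.Chars.isalpha c = true ∨ c = ' ') with h1 | h1
      · exact absurd (List.any_eq_true.mpr ⟨c, hc, h1⟩) h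
      · exact h1
    have : PySem.Chars.strip m = [] :=
      (strip_eq_nil_iff m).mpr (fun c hc => by rw [hall c hc]; decide)
    simp [this]

theorem ports_agree (s : String) : validar_movimentos s = validar_movimentos_alt s := by
  unfold validar_movimentos validar_movimentos_alt
  by_cases hg : (s.toList.isEmpty || !(PySem.Chars.isIn [','] s.toList)) = true
  · simp only [hg, if_true]
  · simp only [Bool.not_eq_true] at hg
    simp only [hg, Bool.false_eq_true, if_false]
    rw [valLoop_eq s.toList false, splitOn_eq_splitC]
    by_cases hall : s.toList.all (fun ch => PySem.Chars.isalpha ch || ch == ' ' || ch == ',') = true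
    · rw [hall]
      simp only [Bool.not_true, Bool.false_eq_true, if_false, Bool.true_and, Bool.false_or]
      have key : ∀ m ∈ splitC s.toList, (!(PySem.Chars.strip m).isEmpty) = m.any PySem.Chars.isalpha := by
        intro m hm
        apply strip_seg
        intro c hc
        have hmem := mem_splitC s.toList m hm c hc
        have hgc := List.all_eq_true.mp hall c hmem.1
        rcases (by simpa using hgc : (PySem.Chars.isalpha c = true ∨ c = ' ') ∨ c = ',') with (h1 | h1) | h1
        · simp [h1]
        · simp [h1]
        · exact absurd h1 hmem.2
      have h2 : ∀ (l : List (List Char)), (∀ m ∈ l, (!(PySem.Chars.strip m).isEmpty) = m.any PySem.Chars.isalpha) →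
          l.all ((fun mov => !mov.isEmpty) ∘ PySem.Chars.strip) = l.all (fun m => m.any PySem.Chars.isalpha) := by
        intro l hl
        induction l with
        | nil => rfl
        | cons a as ih =>
          simp only [List.all_cons, Function.comp]
          rw [hl a (by simp), ih (fun m hm => hl m (by simp [hm]))]
      rw [List.all_map]
      conv_lhs => rw [splitC_head_tail s.toList]
      rw [List.all_cons]
      have h1 : (splitC s.toList).headI ∈ splitC s.toList := by
        rw [splitC_head_tail s.toList]; exact List.mem_cons_self
      rw [show ((fun mov => !mov.isEmpty) ∘ PySem.Chars.strip) (splitC s.toList).headI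
            = (!(PySem.Chars.strip (splitC s.toList).headI).isEmpty) from rfl]
      rw [key _ h1]
      rw [h2 _ (fun m hm => key m (by rw [splitC_head_tail s.toList]; exact List.mem_cons_of_mem _ hm))]
    · rw [show s.toList.all (fun ch => PySem.Chars.isalpha ch || ch == ' ' || ch == ',') = false from by simpa using hall]
      simp

-- ===== VERDICT (by name: the statement is the Claim_ definition above) =====
theorem validar_movimentos_spec : Claim_equal_validar_movimentos := by
  intro s _
  unfold Spec_validar_movimentos
  exact ports_agree s
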